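-- pv_equiv track=rewrite | github.com/junhyeong7788/Python-Problem-Solving | 프로그래머스/0/181935. 홀짝에 따라 다른 값 반환하기/홀짝에 따라 다른 값 반환하기.py | solution
-- ===== SOURCE A (Python) =====
-- def solution(n):
--     odd_answer = []
--     even_answer = []
--
--     if n % 2 == 1:
--         for i in range(n+1):
--             if i % 2 == 1:
--                 odd_answer.append(i)
--         return sum(odd_answer)
--     else :
--         for i in range(n+1):
--             if i % 2 == 0:
--                 even_answer.append(i**2)
--         return sum(even_answer)
-- ===== SOURCE B (Python) =====
-- def solution(n):
--     if n < 0: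
--         return 0
--     if n % 2 == 1:
--         k = (n + 1) // 2
--         return k * k
--     m = n // 2
--     return 2 * m * (m + 1) * (2 * m + 1) // 3
-- ===== Notes on version B (the rewrite author's own statement) =====
-- stated objective: faster
-- what changed: Replaced the O(n) loop that accumulates odds / even squares into a list with O(1) closed-form arithmetic formulas (sum of first k odds = k^2; sum of even squares via the square-pyramidal formula).
import Mathlib
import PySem

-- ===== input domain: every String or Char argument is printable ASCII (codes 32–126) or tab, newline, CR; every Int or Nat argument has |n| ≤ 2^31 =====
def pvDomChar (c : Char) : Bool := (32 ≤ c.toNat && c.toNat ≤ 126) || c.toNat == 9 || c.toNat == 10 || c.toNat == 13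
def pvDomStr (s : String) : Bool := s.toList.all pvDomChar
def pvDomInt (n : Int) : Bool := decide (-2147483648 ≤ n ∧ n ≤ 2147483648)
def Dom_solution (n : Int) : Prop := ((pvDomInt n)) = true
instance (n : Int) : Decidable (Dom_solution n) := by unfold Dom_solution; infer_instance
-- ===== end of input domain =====

-- B replaces A's O(n) accumulation loops with O(1) closed-form formulas (faster, asymptotic).

-- ===== PORT A =====
def solution (n : Int) : Int :=
  if PySem.Int.mod n 2 == 1 then
    let odd_answer := (PySem.List.pyRange 0 (n + 1) 1).foldl
      (fun acc i => if PySem.Int.mod i 2 == 1 then acc ++ [i] else acc) []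
    odd_answer.sum
  else
    let even_answer := (PySem.List.pyRange 0 (n + 1) 1).foldl
      (fun acc i => if PySem.Int.mod i 2 == 0 then acc ++ [i ^ 2] else acc) []
    even_answer.sum

-- ===== PORT B =====
def solution_alt (n : Int) : Int :=
  if n < 0 then 0
  else if PySem.Int.mod n 2 == 1 then
    let k := PySem.Int.floordiv (n + 1) 2
    k * k
  else
    let m := PySem.Int.floordiv n 2
    PySem.Int.floordiv (2 * m * (m + 1) * (2 * m + 1)) 3

-- ===== PRECONDITION & SPEC =====
def Spec_solution (n : Int) (out : Int) : Prop := out = solution_alt n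
instance (n : Int) (out : Int) : Decidable (Spec_solution n out) := by unfold Spec_solution; infer_instance

-- ===== CLAIM (what is proved, stated in full; the proofs are below) =====
def Claim_equal_solution : Prop := ∀ (n : Int), Dom_solution n → Spec_solution n (solution n)

-- ===== LEMMAS AND PROOFS =====

-- sum of odds below (m : Nat) is ⌊m/2⌋²
theorem pv_odd_sum (m : Nat) :
    ((PySem.List.pyRange 0 (m : Int) 1).filter (fun i => PySem.Int.mod i 2 == 1)).sum
      = ((m / 2 : Nat) : Int) ^ 2 := by
  induction m with
  | zero => simp [PySem.List.pyRange_one_eq_nil]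
  | succ m ih =>
    rw [show ((m + 1 : Nat) : Int) = (m : Int) + 1 by push_cast; ring,
        PySem.List.pyRange_one_succ_right (by positivity), List.filter_append, List.sum_append, ih]
    have hmod : PySem.Int.mod (m : Int) 2 = ((m % 2 : Nat) : Int) := PySem.Int.mod_natCast m 2
    rcases Nat.even_or_odd m with ⟨k, hk⟩ | ⟨k, hk⟩
    · have h0 : m % 2 = 0 := by omega
      have hv : PySem.Int.mod (m : Int) 2 = 0 := by rw [hmod, h0]; norm_num
      have hfil : List.filter (fun i => PySem.Int.mod i 2 == 1) [(m : Int)] = [] := by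
        simp only [List.filter_cons, List.filter_nil, hv]; norm_num
      rw [hfil]
      have h1 : (m + 1) / 2 = m / 2 := by omega
      rw [h1]; simp
    · have h1 : m % 2 = 1 := by omega
      have hv : PySem.Int.mod (m : Int) 2 = 1 := by rw [hmod, h1]; norm_num
      have hfil : List.filter (fun i => PySem.Int.mod i 2 == 1) [(m : Int)] = [(m : Int)] := by
        simp only [List.filter_cons, List.filter_nil, hv]; norm_num
      rw [hfil]
      have h2 : (m + 1) / 2 = k + 1 := by omega
      have h3 : m / 2 = k := by omega
      have hm : (m : Int) = 2 * (k : Int) + 1 := by omega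
      rw [h2, h3, List.sum_cons, List.sum_nil, hm]
      push_cast
      ring

-- sum of squares of evens below (m : Nat): three times it equals 2(t-1)t(2t-1) with t = ⌊(m+1)/2⌋
theorem pv_even_sq_sum (m : Nat) :
    3 * (((PySem.List.pyRange 0 (m : Int) 1).filter (fun i => PySem.Int.mod i 2 == 0)).map
          (fun i => i ^ 2)).sum
      = 2 * ((((m + 1) / 2 : Nat) : Int) - 1) * (((m + 1) / 2 : Nat) : Int)
          * (2 * (((m + 1) / 2 : Nat) : Int) - 1) := by
  induction m with
  | zero => simp [PySem.List.pyRange_one_eq_nil]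
  | succ m ih =>
    rw [show ((m + 1 : Nat) : Int) = (m : Int) + 1 by push_cast; ring,
        PySem.List.pyRange_one_succ_right (by positivity), List.filter_append, List.map_append,
        List.sum_append]
    have hmod : PySem.Int.mod (m : Int) 2 = ((m % 2 : Nat) : Int) := PySem.Int.mod_natCast m 2
    rcases Nat.even_or_odd m with ⟨k, hk⟩ | ⟨k, hk⟩
    · -- m even: the new element m contributes m²; t goes from k to k+1
      have h0 : m % 2 = 0 := by omega
      have hv : PySem.Int.mod (m : Int) 2 = 0 := by rw [hmod, h0]; norm_num
      have hfil : List.filter (fun i => PySem.Int.mod i 2 == 0) [(m : Int)] = [(m : Int)] := by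
        simp only [List.filter_cons, List.filter_nil, hv]; norm_num
      rw [hfil]
      have h1 : (m + 1) / 2 = k := by omega
      have h2 : (m + 1 + 1) / 2 = k + 1 := by omega
      rw [h1] at ih
      rw [h2]
      have hm : (m : Int) = 2 * (k : Int) := by omega
      simp only [List.map_cons, List.map_nil, List.sum_cons, List.sum_nil]
      rw [mul_add, ih, hm]
      push_cast
      ring
    · -- m odd: the new element is odd, filtered out; t unchanged
      have h1 : m % 2 = 1 := by omega
      have hv : PySem.Int.mod (m : Int) 2 = 1 := by rw [hmod, h1]; norm_num
      have hfil : List.filter (fun i => PySem.Int.mod i 2 == 0) [(m : Int)] = [] := by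
        simp only [List.filter_cons, List.filter_nil, hv]; norm_num
      rw [hfil]
      have h2 : (m + 1 + 1) / 2 = (m + 1) / 2 := by omega
      rw [h2]
      simpa using ih

-- ===== VERDICT (by name: the statement is the Claim_ definition above) =====
theorem solution_spec : Claim_equal_solution := by
  unfold Claim_equal_solution
  intro n _
  unfold Spec_solution solution solution_alt
  have hmod2 : PySem.Int.mod n 2 = n % 2 := PySem.Int.mod_eq_emod_of_pos (by norm_num)
  by_cases hneg : n < 0
  · have hnil : PySem.List.pyRange 0 (n + 1) 1 = [] := PySem.List.pyRange_one_eq_nil (by omega)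
    simp [hnil, hneg]
  · rw [Int.not_lt] at hneg
    have hcast : (((n + 1).toNat : Nat) : Int) = n + 1 := by omega
    rw [if_neg (by omega : ¬ n < 0)]
    by_cases hodd : PySem.Int.mod n 2 == 1
    · rw [if_pos hodd, if_pos hodd, ← hcast,
          PySem.List.foldl_append_if_eq_filter, List.nil_append, pv_odd_sum ((n + 1).toNat)]
      have hk : PySem.Int.floordiv ((((n + 1).toNat : Nat) : Int)) 2
          = (((n + 1).toNat / 2 : Nat) : Int) := by
        rw [PySem.Int.floordiv_eq_ediv_of_pos (by norm_num)]; omega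
      rw [hk]; ring
    · rw [if_neg hodd, if_neg hodd, ← hcast,
          PySem.List.foldl_append_if (fun i => PySem.Int.mod i 2 == 0) (fun i => i ^ 2),
          List.nil_append]
      have heven : n % 2 = 0 := by
        rw [hmod2] at hodd; simp at hodd; omega
      have h3 := pv_even_sq_sum ((n + 1).toNat)
      have ht : ((((n + 1).toNat + 1) / 2 : Nat) : Int) = n / 2 + 1 := by omega
      rw [ht] at h3
      have hm' : PySem.Int.floordiv n 2 = n / 2 :=
        PySem.Int.floordiv_eq_ediv_of_pos (by norm_num)
      rw [hm']
      rw [PySem.Int.floordiv_eq_ediv_of_pos (by norm_num : (0:Int) < 3)]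
      have hX : 2 * (n / 2) * (n / 2 + 1) * (2 * (n / 2) + 1)
          = 3 * ((((PySem.List.pyRange 0 ((((n + 1).toNat : Nat) : Int)) 1).filter
              (fun i => PySem.Int.mod i 2 == 0)).map (fun i => i ^ 2)).sum) := by
        rw [h3]; ring
      rw [hX, Int.mul_ediv_cancel_left _ (by norm_num : (3:Int) ≠ 0)]
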